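-- pv_equiv track=rewrite | github.com/tata1mg/deputydev-core | deputydev_core/services/repo/local_repo/diff_applicators/line_numbered_diff/applicator.py | _apply_diff_in_file_content
-- ===== SOURCE A (Python) =====
-- from typing import Dict, List, Tuple
--
-- def _apply_diff_in_file_content(content: List[str], chunks: List[Tuple[int, int, str]]) -> List[str]:
--     modified_content = []
--     current_chunk_index = 0  # Tracks the current chunk being processed
--     skip_line_upto = 0  # Tracks the lines to skip due to chunk processing
--
--     # Process the file line by line
--     for idx, line in enumerate(content):
--         # Skip lines that are part of an already-applied chunk
--         if idx < skip_line_upto: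
--             continue
--
--         # If there are no remaining chunks, append the line as-is
--         if current_chunk_index >= len(chunks):
--             modified_content.append(line)
--             continue
--
--         line_number = idx + 1  # Convert zero-based index to line number
--
--         # Check if the current line matches the start of the current chunk
--         if chunks[current_chunk_index][0] == line_number:
--             # Extract chunk details
--             _, end_line, diff = chunks[current_chunk_index]
--             diff_lines = diff.split("\n")  # Split diff content into lines
--
--             # Add the diff content to the modified content
--             modified_content.extend([line + "\n" for line in diff_lines])
--             # remove the last newline character
--             modified_content = modified_content[:-1]
--
--             # Update the skip range and move to the next chunk
--             skip_line_upto = end_line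
--             current_chunk_index += 1
--         else:
--             # If the current line is outside the chunk, append it as-is
--             modified_content.append(line)
--
--     # Handle any remaining chunks after processing the file lines
--     for chunk in chunks[current_chunk_index:]:
--         _, _, diff = chunk
--         diff_lines = diff.split("\n")
--         modified_content.extend([line + "\n" for line in diff_lines])
--
--     return modified_content
-- ===== SOURCE B (Python) =====
-- from typing import Dict, List, Tuple
--
-- def _apply_diff_in_file_content(content: List[str], chunks: List[Tuple[int, int, str]]) -> List[str]:
--     result = []
--     pos = 0  # zero-based pointer into content
--     n = len(content)
--     applied = 0
--     for start, end, diff in chunks: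
--         s = start - 1
--         if s < pos or s >= n:
--             break  # this chunk can never be applied; it and the rest become trailing
--         result.extend(content[pos:s])
--         result.extend([l + "\n" for l in diff.split("\n")][:-1])
--         pos = max(s + 1, end)
--         applied += 1
--     result.extend(content[pos:])
--     for _, _, diff in chunks[applied:]:
--         result.extend([l + "\n" for l in diff.split("\n")])
--     return result
-- ===== Notes on version B (the rewrite author's own statement) =====
-- stated objective: alternative
-- what changed: Replaces A's line-by-line enumerate scan with a skip flag and chunk cursor by a chunk-driven traversal that keeps one pointer into content, copies whole slices between chunk starts, and breaks to a trailing flush at the first chunk that can no longer be applied.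
import Mathlib
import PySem

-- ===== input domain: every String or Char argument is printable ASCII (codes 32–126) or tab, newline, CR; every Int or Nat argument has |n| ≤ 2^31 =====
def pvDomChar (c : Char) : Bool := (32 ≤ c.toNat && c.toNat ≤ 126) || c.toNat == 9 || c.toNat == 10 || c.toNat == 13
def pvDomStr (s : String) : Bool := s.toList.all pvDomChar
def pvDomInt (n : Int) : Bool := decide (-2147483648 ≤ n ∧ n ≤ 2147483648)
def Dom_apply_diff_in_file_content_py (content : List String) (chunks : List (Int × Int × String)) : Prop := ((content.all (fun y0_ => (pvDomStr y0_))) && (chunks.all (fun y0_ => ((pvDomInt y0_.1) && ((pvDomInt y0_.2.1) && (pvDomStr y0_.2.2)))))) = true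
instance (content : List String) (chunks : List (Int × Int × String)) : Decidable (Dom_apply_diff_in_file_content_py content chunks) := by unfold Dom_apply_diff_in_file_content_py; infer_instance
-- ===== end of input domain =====

-- B replaces A's line-by-line enumerate/skip-flag scan with a chunk-driven traversal that copies
-- whole slices of content per chunk (one pointer, break to a trailing flush); same cost, simpler decomposition.

-- ===== PORT A =====
-- '[line + "\n" for line in diff.split("\n")]' (split on "\n" is exact: PySem.Chars.splitOn)
def pyA_diffNl (diff : String) : List String :=
  (PySem.Chars.splitOn diff.toList ['\n']).map (fun l => String.ofList (l ++ ['\n']))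

-- A's main for-loop over enumerate(content): state = (modified_content, current_chunk_index, skip_line_upto).
-- 'modified_content[:-1]' is ported as .dropLast (exact, including the empty case).
def pyA_loop (chunks : List (Int × Int × String)) :
    List (Int × String) → List String → Nat → Int → List String × Nat
  | [], m, ci, _ => (m, ci)
  | (idx, line) :: rest, m, ci, skip =>
    if idx < skip then pyA_loop chunks rest m ci skip
    else if h : ci < chunks.length then
      -- Python tests 'current_chunk_index >= len(chunks)' first; that case is this dite's else-branch
      if (chunks[ci]).1 = idx + 1 then
        pyA_loop chunks rest ((m ++ pyA_diffNl (chunks[ci]).2.2).dropLast) (ci + 1) (chunks[ci]).2.1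
      else pyA_loop chunks rest (m ++ [line]) ci skip
    else pyA_loop chunks rest (m ++ [line]) ci skip

def apply_diff_in_file_content_py (content : List String) (chunks : List (Int × Int × String)) : List String :=
  let p := pyA_loop chunks (PySem.List.enumerate content 0) [] 0 0
  -- trailing loop: 'for chunk in chunks[current_chunk_index:]'; chunks[ci:] with ci : Nat is List.drop
  (chunks.drop p.2).foldl (fun m c => m ++ pyA_diffNl c.2.2) p.1

-- ===== PORT B =====
-- same list comprehension as in Source B
def pyB_diffNl (diff : String) : List String :=
  (PySem.Chars.splitOn diff.toList ['\n']).map (fun l => String.ofList (l ++ ['\n']))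

-- B's trailing loop: every remaining chunk's diff lines, no drop of the last line
def pyB_trail (cs : List (Int × Int × String)) : List String :=
  cs.foldl (fun r c => r ++ pyB_diffNl c.2.2) []

-- B's chunk loop: pointer pos into content; break (→ trailing flush) on the first unappliable chunk
def pyB_go (content : List String) (n : Nat) :
    List (Int × Int × String) → Int → List String
  | [], pos => PySem.List.slice content (some pos) none
  | (start, e, diff) :: rest, pos =>
    let s := start - 1
    if s < pos ∨ (n : Int) ≤ s then
      PySem.List.slice content (some pos) none ++ pyB_trail ((start, e, diff) :: rest)
    else
      PySem.List.slice content (some pos) (some s)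
        ++ (pyB_diffNl diff).dropLast
        ++ pyB_go content n rest (max (s + 1) e)

def apply_diff_in_file_content_py_alt (content : List String) (chunks : List (Int × Int × String)) : List String :=
  pyB_go content content.length chunks 0

-- ===== PRECONDITION & SPEC =====
def Spec_apply_diff_in_file_content_py (content : List String) (chunks : List (Int × Int × String)) (out : List String) : Prop := out = apply_diff_in_file_content_py_alt content chunks
instance (content : List String) (chunks : List (Int × Int × String)) (out : List String) : Decidable (Spec_apply_diff_in_file_content_py content chunks out) := by unfold Spec_apply_diff_in_file_content_py; infer_instance

-- ===== CLAIM (what is proved, stated in full; the proofs are below) =====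
def Claim_equal_apply_diff_in_file_content_py : Prop := ∀ (content : List String) (chunks : List (Int × Int × String)), Dom_apply_diff_in_file_content_py content chunks → Spec_apply_diff_in_file_content_py content chunks (apply_diff_in_file_content_py content chunks)

-- ===== LEMMAS AND PROOFS =====

-- A's trailing fold applied to the loop's final (modified_content, current_chunk_index)
def pvAfter (chunks : List (Int × Int × String)) (p : List String × Nat) : List String :=
  (chunks.drop p.2).foldl (fun m c => m ++ pyA_diffNl c.2.2) p.1

theorem splitOn_go_ne_nil (sep : List Char) :
    ∀ (fuel : Nat) (l cur : List Char) (acc : List (List Char)),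
      PySem.Chars.splitOn.go sep fuel l cur acc ≠ [] := by
  intro fuel
  induction fuel with
  | zero => intro l cur acc; simp [PySem.Chars.splitOn.go]
  | succ n ih =>
    intro l cur acc
    cases l with
    | nil => simp [PySem.Chars.splitOn.go]
    | cons c rest =>
      rw [PySem.Chars.splitOn.go]
      split
      · exact ih _ _ _
      · exact ih _ _ _

theorem diffNl_ne_nil (d : String) : pyB_diffNl d ≠ [] := by
  unfold pyB_diffNl PySem.Chars.splitOn
  simp [splitOn_go_ne_nil]

theorem pyA_diffNl_eq : pyA_diffNl = pyB_diffNl := rfl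

theorem trail_shift (cs : List (Int × Int × String)) :
    ∀ m : List String, cs.foldl (fun r c => r ++ pyB_diffNl c.2.2) m = m ++ pyB_trail cs := by
  induction cs with
  | nil => intro m; simp [pyB_trail]
  | cons c rest ih =>
    intro m
    simp only [pyB_trail, List.foldl_cons, List.nil_append]
    rw [ih, ih (pyB_diffNl c.2.2), List.append_assoc]

theorem slice_from_ge {α : Type} (xs : List α) (pos : Int) (h : (xs.length : Int) ≤ pos) :
    PySem.List.slice xs (some pos) none = [] := by
  rw [PySem.List.slice_from xs (by omega)]
  exact List.drop_eq_nil_of_le (by omega)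

-- pyB_go past the end of content is exactly the trailing flush
theorem pyB_go_term (content : List String) (cs : List (Int × Int × String)) (pos : Int)
    (h : (content.length : Int) ≤ pos) :
    pyB_go content content.length cs pos = pyB_trail cs := by
  cases cs with
  | nil => simp [pyB_go, slice_from_ge content pos h, pyB_trail]
  | cons c rest =>
    obtain ⟨st, e, d⟩ := c
    rw [pyB_go]
    have hbr : st - 1 < pos ∨ (content.length : Int) ≤ st - 1 := by omega
    simp only [if_pos hbr, slice_from_ge content pos h, List.nil_append]

-- pyB_go at an unmatched in-range position emits one content line and advances
theorem pyB_go_step (content : List String) (cs : List (Int × Int × String)) (k : Nat)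
    (hk : k < content.length)
    (hm : ∀ st e d rest, cs = (st, e, d) :: rest → st - 1 ≠ (k : Int)) :
    pyB_go content content.length cs (k : Int)
      = content[k] :: pyB_go content content.length cs ((k : Int) + 1) := by
  have hk1 : ((k : Int) + 1) = ((k + 1 : Nat) : Int) := by push_cast; ring
  cases cs with
  | nil =>
    simp only [pyB_go, hk1]
    rw [PySem.List.slice_from content (by omega), PySem.List.slice_from content (by omega)]
    simp only [Int.toNat_natCast]
    exact List.drop_eq_getElem_cons hk
  | cons c rest =>
    obtain ⟨st, e, d⟩ := c
    have hne : st - 1 ≠ (k : Int) := hm st e d rest rfl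
    rw [pyB_go, pyB_go]
    split_ifs with h1 h2 h2
    · -- break at pos k and at pos k+1
      simp only [hk1]
      rw [PySem.List.slice_from content (by omega), PySem.List.slice_from content (by omega)]
      simp only [Int.toNat_natCast]
      rw [List.drop_eq_getElem_cons hk, List.cons_append]
    · exact absurd h1 (by omega)
    · exact absurd h2 (by omega)
    · -- chunk applies later than k: both sides copy content[k] first
      rw [PySem.List.slice_toNat content (by omega) (by omega),
          PySem.List.slice_toNat content (by omega) (by omega)]
      simp only [Int.toNat_natCast, hk1]
      have hgt : (k : Int) < st - 1 := by omega
      have hq : (st - 1).toNat - k = ((st - 1).toNat - (k + 1)) + 1 := by omega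
      rw [List.drop_eq_getElem_cons hk, hq, List.take_succ_cons]
      simp

theorem main_term (content : List String) (chunks : List (Int × Int × String))
    (k : Nat) (m : List String) (ci : Nat) (skip : Int) (hk : content.length ≤ k) :
    pvAfter chunks (pyA_loop chunks (PySem.List.enumerate (content.drop k) (k : Int)) m ci skip)
      = m ++ pyB_go content content.length (chunks.drop ci) (max (k : Int) skip) := by
  rw [List.drop_eq_nil_of_le hk, PySem.List.enumerate_nil]
  rw [pyB_go_term content _ _ (le_trans (by exact_mod_cast hk) (le_max_left _ _))]
  show (chunks.drop ci).foldl (fun m c => m ++ pyA_diffNl c.2.2) m = m ++ pyB_trail (chunks.drop ci)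
  rw [pyA_diffNl_eq]
  exact trail_shift (chunks.drop ci) m

theorem main_lemma (content : List String) (chunks : List (Int × Int × String)) :
    ∀ (fuel k : Nat), content.length - k ≤ fuel →
    ∀ (m : List String) (ci : Nat) (skip : Int),
    pvAfter chunks (pyA_loop chunks (PySem.List.enumerate (content.drop k) (k : Int)) m ci skip)
      = m ++ pyB_go content content.length (chunks.drop ci) (max (k : Int) skip) := by
  intro fuel
  induction fuel with
  | zero =>
    intro k h m ci skip
    exact main_term content chunks k m ci skip (by omega)
  | succ n ih =>
    intro k h m ci skip
    by_cases hk : content.length ≤ k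
    · exact main_term content chunks k m ci skip hk
    push_neg at hk
    have hfuel : content.length - (k + 1) ≤ n := by omega
    have hk1 : ((k : Int) + 1) = ((k + 1 : Nat) : Int) := by push_cast; ring
    rw [List.drop_eq_getElem_cons hk, PySem.List.enumerate_cons]
    by_cases h1 : (k : Int) < skip
    · -- line is skipped: idx < skip_line_upto
      rw [pyA_loop]
      simp only [if_pos h1, hk1]
      rw [ih (k + 1) hfuel m ci skip]
      have : max ((k + 1 : Nat) : Int) skip = max (k : Int) skip := by push_cast; omega
      rw [this]
    push_neg at h1
    have hmaxk : max (k : Int) skip = (k : Int) := by omega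
    by_cases h2 : ci < chunks.length
    · by_cases h3 : (chunks[ci]).1 = (k : Int) + 1
      · -- the chunk applies at this line
        have h3' : (chunks[ci]).1 = ((k + 1 : Nat) : Int) := h3.trans hk1
        rw [pyA_loop]
        simp only [if_neg (by omega : ¬ (k : Int) < skip), dif_pos h2, if_pos h3', hk1]
        rw [ih (k + 1) hfuel _ (ci + 1) (chunks[ci]).2.1]
        rw [List.drop_eq_getElem_cons h2, hmaxk]
        rcases hc : chunks[ci] with ⟨st, e, d⟩
        rw [pyB_go]
        have hst : st = (k : Int) + 1 := by rw [hc] at h3; exact h3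
        have hs : st - 1 = (k : Int) := by omega
        simp only [hs, if_neg (by omega : ¬ ((k : Int) < (k : Int) ∨ (content.length : Int) ≤ (k : Int)))]
        rw [PySem.List.slice_toNat content (by omega) (by omega)]
        simp only [Int.toNat_natCast, Nat.sub_self, List.take_zero, List.nil_append]
        rw [List.dropLast_append_of_ne_nil (by rw [pyA_diffNl_eq]; exact diffNl_ne_nil d)]
        rw [pyA_diffNl_eq, hk1, List.append_assoc]
      · -- current chunk does not start here: append the line as-is
        have h3' : ¬ (chunks[ci]).1 = ((k + 1 : Nat) : Int) := by rw [← hk1]; exact h3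
        rw [pyA_loop]
        simp only [if_neg (by omega : ¬ (k : Int) < skip), dif_pos h2, if_neg h3', hk1]
        rw [ih (k + 1) hfuel (m ++ [content[k]]) ci skip]
        have hmax1 : max ((k + 1 : Nat) : Int) skip = (k : Int) + 1 := by push_cast; omega
        rw [hmax1, hmaxk]
        rw [pyB_go_step content (chunks.drop ci) k hk]
        · simp
        · intro st e d rest hdc
          have : chunks[ci] = (st, e, d) := by
            have := List.drop_eq_getElem_cons h2 (l := chunks)
            rw [hdc] at this
            exact (List.cons.injEq _ _ _ _ ▸ this).1.symm ▸ rfl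
          intro hcontra
          apply h3
          rw [this]
          omega
    · -- no chunks remain: append the line as-is
      push_neg at h2
      rw [pyA_loop]
      simp only [if_neg (by omega : ¬ (k : Int) < skip), dif_neg (by omega : ¬ ci < chunks.length), hk1]
      rw [ih (k + 1) hfuel (m ++ [content[k]]) ci skip]
      rw [List.drop_eq_nil_of_le h2]
      have hmax1 : max ((k + 1 : Nat) : Int) skip = (k : Int) + 1 := by push_cast; omega
      rw [hmax1, hmaxk]
      rw [pyB_go_step content [] k hk (by intro _ _ _ _ h; cases h)]
      simp

-- ===== VERDICT (by name: the statement is the Claim_ definition above) =====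
theorem apply_diff_in_file_content_py_spec : Claim_equal_apply_diff_in_file_content_py := by
  intro content chunks _
  unfold Spec_apply_diff_in_file_content_py apply_diff_in_file_content_py apply_diff_in_file_content_py_alt
  have h := main_lemma content chunks content.length 0 (by omega) [] 0 0
  simpa [pvAfter] using h
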